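-- pv_equiv track=rewrite | github.com/Kinza-13/ResPred.AI | amr/views.py | _guess_id_col
-- ===== SOURCE A (Python) =====
-- _ID_CANDIDATES = ("id", "seq_id", "sequence_id", "name", "header", "accession", "sequence id", "seq id")
--
-- def _guess_id_col(fieldnames):
--     if not fieldnames:
--         return None
--     lower = [c.lower().strip() for c in fieldnames]
--     for cand in _ID_CANDIDATES:
--         for i, h in enumerate(lower):
--             if cand == h:
--                 return fieldnames[i]
--     # fallbacks
--     for i, h in enumerate(lower):
--         if "id" == h or h.endswith("_id"):
--             return fieldnames[i]
--     return fieldnames[0]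
-- ===== SOURCE B (Python) =====
-- _ID_CANDIDATES = ("id", "seq_id", "sequence_id", "name", "header", "accession", "sequence id", "seq id")
--
-- def _guess_id_col(fieldnames):
--     if not fieldnames:
--         return None
--     prio = {c: i for i, c in enumerate(_ID_CANDIDATES)}
--     best_rank = 9          # anything matched has rank <= 8
--     best_i = None
--     for i, name in enumerate(fieldnames):
--         h = name.lower().strip()
--         r = prio.get(h)
--         if r is None and (h == "id" or h.endswith("_id")):
--             r = 8          # fallback rank, worse than every exact candidate
--         if r is not None and r < best_rank:
--             best_rank = r
--             best_i = i
--     return fieldnames[best_i if best_i is not None else 0]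
-- ===== Notes on version B (the rewrite author's own statement) =====
-- stated objective: faster
-- what changed: Replaces A's candidate-by-candidate rescans of the header list (plus a separate fallback pass) by one single pass that ranks each header via a precomputed candidate-to-priority dict and keeps the first header of minimal rank.
import Mathlib
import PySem

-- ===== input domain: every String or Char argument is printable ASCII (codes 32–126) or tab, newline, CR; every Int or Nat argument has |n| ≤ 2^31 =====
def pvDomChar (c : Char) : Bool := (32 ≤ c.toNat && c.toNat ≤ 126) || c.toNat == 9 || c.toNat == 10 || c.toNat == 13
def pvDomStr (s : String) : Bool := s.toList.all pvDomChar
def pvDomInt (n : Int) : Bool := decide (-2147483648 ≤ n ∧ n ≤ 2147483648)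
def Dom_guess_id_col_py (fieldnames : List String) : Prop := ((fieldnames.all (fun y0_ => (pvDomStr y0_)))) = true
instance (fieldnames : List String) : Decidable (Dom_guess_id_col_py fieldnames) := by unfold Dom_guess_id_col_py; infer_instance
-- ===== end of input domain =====

-- B replaces A's candidate-by-candidate rescans of the header list (plus a separate
-- fallback pass) by a single pass that ranks each header via a precomputed
-- candidate→priority dict and keeps the first header of minimal rank (objective: faster).

-- ===== PORT A =====
def pvIdCandidates : List String :=
  ["id", "seq_id", "sequence_id", "name", "header", "accession", "sequence id", "seq id"]

-- c.lower().strip()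
def pvNorm (s : String) : String := PySem.Str.strip (PySem.Str.lower s)

-- 'for cand in _ID_CANDIDATES: for i, h in enumerate(lower): if cand == h: return fieldnames[i]'
def pvScanCands : List String → List String → Option Nat
  | [], _ => none
  | c :: cs, lower =>
    match lower.findIdx? (fun h => c == h) with
    | some i => some i
    | none => pvScanCands cs lower

def guess_id_col_py (fieldnames : List String) : Option String :=
  if fieldnames.isEmpty then none
  else
    let lower := fieldnames.map pvNorm
    match pvScanCands pvIdCandidates lower with
    | some i => PySem.List.pyGet? fieldnames (i : Int)
    | none =>
      -- fallback pass: '"id" == h or h.endswith("_id")'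
      match lower.findIdx? (fun h => h == "id" || PySem.Str.endswith h "_id") with
      | some i => PySem.List.pyGet? fieldnames (i : Int)
      | none => PySem.List.pyGet? fieldnames 0

-- ===== PORT B =====
-- prio = {c: i for i, c in enumerate(_ID_CANDIDATES)}
def pvPrio : PySem.Dict String Int :=
  (PySem.List.enumerate pvIdCandidates 0).foldl (fun d p => d.insert p.2 p.1) PySem.Dict.empty

-- one iteration of B's single loop over enumerate(fieldnames), state = (best_rank, best_i)
def pvStep (st : Int × Option Int) (p : Int × String) : Int × Option Int :=
  let h := pvNorm p.2
  let r : Option Int :=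
    match pvPrio.get? h with
    | some r => some r
    | none => if h == "id" || PySem.Str.endswith h "_id" then some 8 else none
  match r with
  | some r => if r < st.1 then (r, some p.1) else st
  | none => st

def guess_id_col_py_alt (fieldnames : List String) : Option String :=
  if fieldnames.isEmpty then none
  else
    let res := (PySem.List.enumerate fieldnames 0).foldl pvStep (9, none)
    match res.2 with
    | some i => PySem.List.pyGet? fieldnames i
    | none => PySem.List.pyGet? fieldnames 0

-- ===== PRECONDITION & SPEC =====
def Spec_guess_id_col_py (fieldnames : List String) (out : Option String) : Prop := out = guess_id_col_py_alt fieldnames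
instance (fieldnames : List String) (out : Option String) : Decidable (Spec_guess_id_col_py fieldnames out) := by unfold Spec_guess_id_col_py; infer_instance

-- ===== CLAIM (what is proved, stated in full; the proofs are below) =====
def Claim_equal_guess_id_col_py : Prop := ∀ (fieldnames : List String), Dom_guess_id_col_py fieldnames → Spec_guess_id_col_py fieldnames (guess_id_col_py fieldnames)

-- ===== LEMMAS AND PROOFS =====

-- the fallback predicate shared by both programs
def pvFb (h : String) : Bool := h == "id" || PySem.Str.endswith h "_id"

-- candidate rank, generic in the candidate list: index in cs, cs.length if absent
def pvRankG (cs : List String) (h : String) : Int :=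
  match cs.idxOf? h with
  | some r => (r : Int)
  | none => (cs.length : Int)

-- full rank as B computes it: candidate index, else 8 on fallback, else 10 (no match)
def pvRankF (h : String) : Int :=
  match pvIdCandidates.idxOf? h with
  | some r => (r : Int)
  | none => if pvFb h then 8 else 10

-- minimum of f over a list, with default d
def pvMinBy (f : String → Int) (d : Int) : List String → Int
  | [] => d
  | h :: t => min (f h) (pvMinBy f d t)

lemma pvPrio_get (h : String) :
    pvPrio.get? h = (pvIdCandidates.idxOf? h).map (fun n => (n : Int)) := by
  have hp : pvPrio = PySem.Dict.mk [("id",(0:Int)),("seq_id",1),("sequence_id",2),("name",3),("header",4),("accession",5),("sequence id",6),("seq id",7)] := by rfl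
  rw [hp]
  simp only [pvIdCandidates, PySem.Dict.get?_mk_cons, List.idxOf?_cons, List.idxOf?_nil]
  split_ifs <;> simp [PySem.Dict.get?]

lemma idx_lt : ∀ (cs : List String) (h : String) (r : Nat), cs.idxOf? h = some r → r < cs.length := by
  intro cs
  induction cs with
  | nil => simp
  | cons c cs ih =>
    intro h r hr
    rw [List.idxOf?_cons] at hr
    split_ifs at hr
    · simp_all
      omega
    · simp only [Option.map_eq_some_iff] at hr
      obtain ⟨r', hr', rfl⟩ := hr
      have := ih h r' hr'
      simp; omega

lemma pvRankG_some {cs : List String} {h : String} {r : Nat} (hr : cs.idxOf? h = some r) :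
    pvRankG cs h = (r : Int) := by unfold pvRankG; rw [hr]

lemma pvRankG_none {cs : List String} {h : String} (hr : cs.idxOf? h = none) :
    pvRankG cs h = (cs.length : Int) := by unfold pvRankG; rw [hr]

lemma pvRankF_some {h : String} {r : Nat} (hr : pvIdCandidates.idxOf? h = some r) :
    pvRankF h = (r : Int) := by unfold pvRankF; rw [hr]

lemma pvRankF_none {h : String} (hr : pvIdCandidates.idxOf? h = none) :
    pvRankF h = if pvFb h then 8 else 10 := by unfold pvRankF; rw [hr]

lemma pvRankG_nonneg (cs : List String) (h : String) : 0 ≤ pvRankG cs h := by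
  cases hr : cs.idxOf? h with
  | some r => rw [pvRankG_some hr]; positivity
  | none => rw [pvRankG_none hr]; positivity

lemma pvRankG_le (cs : List String) (h : String) : pvRankG cs h ≤ (cs.length : Int) := by
  cases hr : cs.idxOf? h with
  | some r => rw [pvRankG_some hr]; have := idx_lt cs h r hr; omega
  | none => rw [pvRankG_none hr]

lemma pvLen8 : ((pvIdCandidates.length : Nat) : Int) = 8 := by simp [pvIdCandidates]

lemma pvRankF_of_lt (h : String) (hlt : pvRankG pvIdCandidates h < 8) :
    pvRankF h = pvRankG pvIdCandidates h := by
  cases hr : pvIdCandidates.idxOf? h with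
  | some r => rw [pvRankF_some hr, pvRankG_some hr]
  | none => rw [pvRankG_none hr, pvLen8] at hlt; omega

lemma pvRankG_of_pvRankF_lt (h : String) (hlt : pvRankF h < 8) :
    pvRankF h = pvRankG pvIdCandidates h := by
  cases hr : pvIdCandidates.idxOf? h with
  | some r => rw [pvRankF_some hr, pvRankG_some hr]
  | none => rw [pvRankF_none hr] at hlt; split_ifs at hlt <;> omega

lemma pvRankF_of_ge (h : String) (hge : ¬ pvRankG pvIdCandidates h < 8) :
    pvRankF h = if pvFb h then 8 else 10 := by
  cases hr : pvIdCandidates.idxOf? h with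
  | none => exact pvRankF_none hr
  | some r =>
    exfalso
    have hlt := idx_lt _ _ _ hr
    rw [pvRankG_some hr] at hge
    simp [pvIdCandidates] at hlt
    omega

-- B's loop body, re-expressed through pvRankF
lemma pvStep_eq (st : Int × Option Int) (p : Int × String) (h9 : st.1 ≤ 9) :
    pvStep st p = if pvRankF (pvNorm p.2) < st.1 then (pvRankF (pvNorm p.2), some p.1) else st := by
  simp only [pvStep]
  rw [pvPrio_get]
  cases hr : pvIdCandidates.idxOf? (pvNorm p.2) with
  | some r => rw [pvRankF_some hr]; simp
  | none =>
    rw [pvRankF_none hr]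
    simp only [pvFb]
    by_cases hfb : (pvNorm p.2 == "id" || PySem.Str.endswith (pvNorm p.2) "_id") = true
    · rw [if_pos hfb, if_pos hfb]; rfl
    · have h10 : ¬ (10:Int) < st.1 := by omega
      rw [if_neg hfb, if_neg hfb, if_neg h10]; rfl

-- min lemmas
lemma pvMinBy_le_of_mem {f : String → Int} {d : Int} : ∀ {l : List String} {h : String},
    h ∈ l → pvMinBy f d l ≤ f h := by
  intro l
  induction l with
  | nil => simp
  | cons x t ih =>
    intro h hm
    rcases List.mem_cons.1 hm with rfl | hm
    · simp [pvMinBy]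
    · have := ih hm
      simp only [pvMinBy]
      omega

lemma pvMinBy_ge {f : String → Int} {d c : Int} : ∀ {l : List String},
    (∀ h ∈ l, c ≤ f h) → c ≤ d → c ≤ pvMinBy f d l := by
  intro l
  induction l with
  | nil => intro _ hd; simpa [pvMinBy]
  | cons x t ih =>
    intro hall hd
    have h1 := hall x (by simp)
    have h2 := ih (fun h hm => hall h (by simp [hm])) hd
    simp only [pvMinBy]
    omega

lemma pvMinBy_attained (f : String → Int) (d : Int) : ∀ (l : List String),
    pvMinBy f d l = d ∨ ∃ h ∈ l, pvMinBy f d l = f h := by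
  intro l
  induction l with
  | nil => left; rfl
  | cons x t ih =>
    simp only [pvMinBy]
    by_cases hle : f x ≤ pvMinBy f d t
    · right; exact ⟨x, by simp, by omega⟩
    · rw [min_eq_right (by omega)]
      rcases ih with h | ⟨h, hm, he⟩
      · left; exact h
      · right; exact ⟨h, by simp [hm], he⟩

lemma pvMinBy_map (f : String → Int) (d : Int) (g : String → String) : ∀ (l : List String),
    pvMinBy f d (l.map g) = pvMinBy (fun s => f (g s)) d l := by
  intro l
  induction l with
  | nil => rfl
  | cons x t ih => simp [pvMinBy, ih]

lemma pvMinBy_succ {f g : String → Int} {d d' : Int} : ∀ {l : List String},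
    (∀ h ∈ l, f h = g h + 1) → d = d' + 1 →
    pvMinBy f d l = pvMinBy g d' l + 1 := by
  intro l
  induction l with
  | nil => intro _ hd; simpa [pvMinBy]
  | cons x t ih =>
    intro hall hd
    have h1 := hall x (by simp)
    have h2 := ih (fun h hm => hall h (by simp [hm])) hd
    simp only [pvMinBy, h1, h2]
    omega

lemma findIdx?_congr_mem {p q : String → Bool} : ∀ {l : List String},
    (∀ x ∈ l, p x = q x) → l.findIdx? p = l.findIdx? q := by
  intro l
  induction l with
  | nil => intro _; rfl
  | cons x t ih =>
    intro hall
    rw [List.findIdx?_cons, List.findIdx?_cons, hall x (by simp),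
        ih (fun y hy => hall y (by simp [hy]))]

-- characterization of A's nested candidate scan, generic in the candidate list
lemma pvScan_char : ∀ (cs lower : List String),
    pvScanCands cs lower =
      if pvMinBy (pvRankG cs) (cs.length : Int) lower < (cs.length : Int)
      then lower.findIdx? (fun h => pvRankG cs h == pvMinBy (pvRankG cs) (cs.length : Int) lower)
      else none := by
  intro cs
  induction cs with
  | nil =>
    intro lower
    have h0 : ¬ pvMinBy (pvRankG []) ((List.length ([] : List String) : Nat) : Int) lower < ((List.length ([] : List String) : Nat) : Int) := by
      have := pvMinBy_ge (f := pvRankG []) (d := ((List.length ([] : List String) : Nat) : Int)) (c := 0)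
        (l := lower) (fun h _ => pvRankG_nonneg [] h) (by simp)
      simp at this ⊢
      omega
    rw [if_neg h0]
    rfl
  | cons c cs ih =>
    intro lower
    show (match lower.findIdx? (fun h => c == h) with
          | some i => some i
          | none => pvScanCands cs lower) = _
    have hrank0 : ∀ x, (pvRankG (c :: cs) x = 0) ↔ (c == x) = true := by
      intro x
      unfold pvRankG
      rw [List.idxOf?_cons]
      split_ifs with hc
      · simp [hc]
      · simp only [hc]
        cases List.idxOf? x cs <;> simp_all <;> omega
    cases hf : lower.findIdx? (fun h => c == h) with
    | some i =>
      have hf2 := hf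
      rw [List.findIdx?_eq_some_iff_getElem] at hf2
      obtain ⟨hi, hpi, _⟩ := hf2
      have hmem : lower[i] ∈ lower := List.getElem_mem hi
      have hm0 : pvMinBy (pvRankG (c :: cs)) (((c :: cs).length : Nat) : Int) lower = 0 := by
        have hle : pvMinBy (pvRankG (c :: cs)) (((c :: cs).length : Nat) : Int) lower ≤ 0 := by
          have := pvMinBy_le_of_mem (f := pvRankG (c :: cs)) (d := (((c :: cs).length : Nat) : Int)) hmem
          rw [(hrank0 lower[i]).2 hpi] at this
          exact this
        have hge : (0:Int) ≤ pvMinBy (pvRankG (c :: cs)) (((c :: cs).length : Nat) : Int) lower :=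
          pvMinBy_ge (fun h _ => pvRankG_nonneg _ h) (by positivity)
        omega
      rw [hm0, if_pos (by simp)]
      have hpred : lower.findIdx? (fun h => pvRankG (c :: cs) h == 0) = lower.findIdx? (fun h => c == h) := by
        apply findIdx?_congr_mem
        intro x _
        cases hb : (c == x) with
        | true => simp [(hrank0 x).2 hb]
        | false =>
          have hne : pvRankG (c :: cs) x ≠ 0 := by
            intro h0
            have hcx := (hrank0 x).1 h0
            rw [hb] at hcx
            cases hcx
          simp [hne]
      rw [hpred, hf]
    | none =>
      rw [List.findIdx?_eq_none_iff] at hf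
      have hstep : ∀ x ∈ lower, pvRankG (c :: cs) x = pvRankG cs x + 1 := by
        intro x hx
        have hcx := hf x hx
        cases h2 : List.idxOf? x cs with
        | some r =>
          have h3 : List.idxOf? x (c :: cs) = some (r + 1) := by
            rw [List.idxOf?_cons, if_neg (by simp [hcx]), h2]; rfl
          rw [pvRankG_some h3, pvRankG_some h2]; push_cast; ring
        | none =>
          have h3 : List.idxOf? x (c :: cs) = none := by
            rw [List.idxOf?_cons, if_neg (by simp [hcx]), h2]; rfl
          rw [pvRankG_none h3, pvRankG_none h2]; simp
      have hmin : pvMinBy (pvRankG (c :: cs)) ((c :: cs).length : Int) lower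
          = pvMinBy (pvRankG cs) (cs.length : Int) lower + 1 :=
        pvMinBy_succ hstep (by simp)
      rw [hmin, ih lower]
      have hcond : (pvMinBy (pvRankG cs) ((cs.length : Nat) : Int) lower + 1 < (((c :: cs).length : Nat) : Int))
          ↔ (pvMinBy (pvRankG cs) ((cs.length : Nat) : Int) lower < ((cs.length : Nat) : Int)) := by
        simp
      by_cases hc : pvMinBy (pvRankG cs) ((cs.length : Nat) : Int) lower < ((cs.length : Nat) : Int)
      · rw [if_pos hc, if_pos (hcond.2 hc)]
        apply Eq.symm
        apply findIdx?_congr_mem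
        intro x hx
        rw [hstep x hx]
        rcases Bool.eq_false_or_eq_true (pvRankG cs x == pvMinBy (pvRankG cs) ((cs.length : Nat) : Int) lower) with hb | hb <;>
          rw [hb] <;> simp_all
      · rw [if_neg hc, if_neg (by rw [hcond]; exact hc)]

-- characterization of B's fold
lemma pvFold_char : ∀ (l : List String) (n br : Int) (bi : Option Int), br ≤ 9 →
    (pvMinBy (fun s => pvRankF (pvNorm s)) 10 l < br →
      ∃ j : Nat, l.findIdx? (fun s => pvRankF (pvNorm s) == pvMinBy (fun s => pvRankF (pvNorm s)) 10 l) = some j ∧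
        (PySem.List.enumerate l n).foldl pvStep (br, bi) = (pvMinBy (fun s => pvRankF (pvNorm s)) 10 l, some (n + j)))
    ∧ (¬ pvMinBy (fun s => pvRankF (pvNorm s)) 10 l < br →
        (PySem.List.enumerate l n).foldl pvStep (br, bi) = (br, bi)) := by
  intro l
  induction l with
  | nil =>
    intro n br bi h9
    constructor
    · intro hlt
      exfalso
      simp [pvMinBy] at hlt
      omega
    · intro _
      rfl
  | cons s t ih =>
    intro n br bi h9
    rw [PySem.List.enumerate_cons, List.foldl_cons, pvStep_eq (br, bi) (n, s) h9]
    simp only [pvMinBy]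
    have hmle : min (pvRankF (pvNorm s)) (pvMinBy (fun s => pvRankF (pvNorm s)) 10 t) ≤ pvRankF (pvNorm s) := min_le_left _ _
    by_cases hrb : pvRankF (pvNorm s) < br
    · rw [if_pos hrb]
      have ih' := ih (n + 1) (pvRankF (pvNorm s)) (some n) (by omega)
      constructor
      · intro _
        by_cases hmt : pvMinBy (fun s => pvRankF (pvNorm s)) 10 t < pvRankF (pvNorm s)
        · have hmin : min (pvRankF (pvNorm s)) (pvMinBy (fun s => pvRankF (pvNorm s)) 10 t)
              = pvMinBy (fun s => pvRankF (pvNorm s)) 10 t := by omega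
          rw [hmin]
          obtain ⟨j, hj, hfold⟩ := ih'.1 hmt
          refine ⟨j + 1, ?_, ?_⟩
          · rw [List.findIdx?_cons, if_neg (by simp only [beq_iff_eq]; omega), hj]
            rfl
          · rw [hfold]
            refine congrArg _ (congrArg _ ?_)
            push_cast
            ring
        · have hmin : min (pvRankF (pvNorm s)) (pvMinBy (fun s => pvRankF (pvNorm s)) 10 t)
              = pvRankF (pvNorm s) := by omega
          rw [hmin]
          have hfold := ih'.2 hmt
          refine ⟨0, ?_, ?_⟩
          · rw [List.findIdx?_cons, if_pos (by simp)]
          · rw [hfold]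
            simp
      · intro hge
        exfalso
        omega
    · rw [if_neg hrb]
      have ih' := ih (n + 1) br bi h9
      constructor
      · intro hlt
        have hmt : pvMinBy (fun s => pvRankF (pvNorm s)) 10 t < br := by omega
        have hmin : min (pvRankF (pvNorm s)) (pvMinBy (fun s => pvRankF (pvNorm s)) 10 t)
            = pvMinBy (fun s => pvRankF (pvNorm s)) 10 t := by omega
        rw [hmin]
        obtain ⟨j, hj, hfold⟩ := ih'.1 hmt
        refine ⟨j + 1, ?_, ?_⟩
        · rw [List.findIdx?_cons, if_neg (by simp only [beq_iff_eq]; omega), hj]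
          rfl
        · rw [hfold]
          refine congrArg _ (congrArg _ ?_)
          push_cast
          ring
      · intro hge
        exact ih'.2 (by omega)

-- min over a list is at most the default
lemma pvMinBy_le_default (f : String → Int) (d : Int) : ∀ (l : List String), pvMinBy f d l ≤ d := by
  intro l
  induction l with
  | nil => simp [pvMinBy]
  | cons x t ih => simp only [pvMinBy]; omega

-- ===== VERDICT (by name: the statement is the Claim_ definition above) =====
theorem guess_id_col_py_spec : Claim_equal_guess_id_col_py := by
  intro fieldnames _
  unfold Spec_guess_id_col_py
  by_cases hne : fieldnames.isEmpty
  · simp [guess_id_col_py, guess_id_col_py_alt, hne]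
  · simp only [Bool.not_eq_true] at hne
    simp only [guess_id_col_py, guess_id_col_py_alt, hne, Bool.false_eq_true, if_false]
    rw [pvScan_char]
    have hmap : pvMinBy (pvRankG pvIdCandidates) ((pvIdCandidates.length : Nat) : Int) (fieldnames.map pvNorm)
        = pvMinBy (fun x => pvRankG pvIdCandidates (pvNorm x)) 8 fieldnames := by
      rw [pvLen8, pvMinBy_map]
    rw [hmap, pvLen8]
    have hfold := pvFold_char fieldnames 0 9 none (by omega)
    have hmCle : pvMinBy (fun x => pvRankG pvIdCandidates (pvNorm x)) 8 fieldnames ≤ 8 :=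
      pvMinBy_le_default _ _ _
    have hmFle10 : pvMinBy (fun s => pvRankF (pvNorm s)) 10 fieldnames ≤ 10 :=
      pvMinBy_le_default _ _ _
    by_cases hc : pvMinBy (fun x => pvRankG pvIdCandidates (pvNorm x)) 8 fieldnames < 8
    · -- a candidate matches: both return the first header of minimal candidate rank
      rw [if_pos hc]
      -- mF = mC
      have hmFmC : pvMinBy (fun s => pvRankF (pvNorm s)) 10 fieldnames
          = pvMinBy (fun x => pvRankG pvIdCandidates (pvNorm x)) 8 fieldnames := by
        have h1 : pvMinBy (fun s => pvRankF (pvNorm s)) 10 fieldnames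
            ≤ pvMinBy (fun x => pvRankG pvIdCandidates (pvNorm x)) 8 fieldnames := by
          rcases pvMinBy_attained (fun x => pvRankG pvIdCandidates (pvNorm x)) 8 fieldnames with h8 | ⟨w, hw, hwv⟩
          · omega
          · have hble : pvMinBy (fun s => pvRankF (pvNorm s)) 10 fieldnames ≤ pvRankF (pvNorm w) :=
              pvMinBy_le_of_mem hw
            rw [pvRankF_of_lt (pvNorm w) (by omega)] at hble
            omega
        rcases pvMinBy_attained (fun s => pvRankF (pvNorm s)) 10 fieldnames with h10 | ⟨w2, hw2, hv2⟩
        · omega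
        · have hlt2 : pvRankF (pvNorm w2) < 8 := by omega
          have heq2 := pvRankG_of_pvRankF_lt (pvNorm w2) hlt2
          have hble2 : pvMinBy (fun x => pvRankG pvIdCandidates (pvNorm x)) 8 fieldnames ≤ pvRankG pvIdCandidates (pvNorm w2) :=
            pvMinBy_le_of_mem hw2
          omega
      obtain ⟨j, hj, hB⟩ := hfold.1 (by omega)
      rw [hB]
      have hA : (fieldnames.map pvNorm).findIdx?
          (fun h => pvRankG pvIdCandidates h == pvMinBy (fun x => pvRankG pvIdCandidates (pvNorm x)) 8 fieldnames) = some j := by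
        rw [List.findIdx?_map]
        rw [← hj]
        apply findIdx?_congr_mem
        intro x _
        simp only [Function.comp]
        by_cases hx : pvRankG pvIdCandidates (pvNorm x) < 8
        · rw [pvRankF_of_lt (pvNorm x) hx, hmFmC]
        · rw [pvRankF_of_ge (pvNorm x) hx, hmFmC]
          have hge8 : ¬ pvRankG pvIdCandidates (pvNorm x) = pvMinBy (fun x => pvRankG pvIdCandidates (pvNorm x)) 8 fieldnames := by omega
          have hge8' : ¬ (if pvFb (pvNorm x) then (8:Int) else 10) = pvMinBy (fun x => pvRankG pvIdCandidates (pvNorm x)) 8 fieldnames := by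
            split_ifs <;> omega
          have e1 : (pvRankG pvIdCandidates (pvNorm x) == pvMinBy (fun x => pvRankG pvIdCandidates (pvNorm x)) 8 fieldnames) = false := by
            rw [beq_eq_false_iff_ne]; omega
          have e2 : ((if pvFb (pvNorm x) then (8:Int) else 10) == pvMinBy (fun x => pvRankG pvIdCandidates (pvNorm x)) 8 fieldnames) = false := by
            rw [beq_eq_false_iff_ne]; split_ifs <;> omega
          rw [e1, e2]
      rw [hA]
      simp
    · -- no candidate anywhere: both fall back to first 'id'/'*_id' header, else headers[0]
      rw [if_neg hc]
      have hmC8 : pvMinBy (fun x => pvRankG pvIdCandidates (pvNorm x)) 8 fieldnames = 8 := by omega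
      have hall : ∀ x ∈ fieldnames, pvRankG pvIdCandidates (pvNorm x) = 8 := by
        intro x hx
        have h1 : pvMinBy (fun x => pvRankG pvIdCandidates (pvNorm x)) 8 fieldnames ≤ pvRankG pvIdCandidates (pvNorm x) :=
          pvMinBy_le_of_mem hx
        have h2 := pvRankG_le pvIdCandidates (pvNorm x)
        rw [pvLen8] at h2
        omega
      have hrF : ∀ x ∈ fieldnames, pvRankF (pvNorm x) = if pvFb (pvNorm x) then 8 else 10 := by
        intro x hx
        exact pvRankF_of_ge (pvNorm x) (by have := hall x hx; omega)
      have hAf : (fieldnames.map pvNorm).findIdx? (fun h => h == "id" || PySem.Str.endswith h "_id")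
          = fieldnames.findIdx? (fun x => pvFb (pvNorm x)) := by
        rw [show (fun h : String => h == "id" || PySem.Str.endswith h "_id") = pvFb from rfl,
            List.findIdx?_map, Function.comp_def]
      rw [hAf]
      cases hfall : fieldnames.findIdx? (fun x => pvFb (pvNorm x)) with
      | some i =>
        have hfall2 := hfall
        rw [List.findIdx?_eq_some_iff_getElem] at hfall2
        obtain ⟨hi, hpi, _⟩ := hfall2
        have hmem : fieldnames[i] ∈ fieldnames := List.getElem_mem hi
        have hmF8 : pvMinBy (fun s => pvRankF (pvNorm s)) 10 fieldnames = 8 := by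
          have hle : pvMinBy (fun s => pvRankF (pvNorm s)) 10 fieldnames ≤ 8 := by
            have hble3 : pvMinBy (fun s => pvRankF (pvNorm s)) 10 fieldnames ≤ pvRankF (pvNorm fieldnames[i]) :=
              pvMinBy_le_of_mem hmem
            rw [hrF fieldnames[i] hmem, if_pos hpi] at hble3
            exact hble3
          rcases pvMinBy_attained (fun s => pvRankF (pvNorm s)) 10 fieldnames with h10 | ⟨w, hw, hv⟩
          · omega
          · have := hrF w hw
            split_ifs at this <;> omega
        obtain ⟨j, hj, hB⟩ := hfold.1 (by omega)
        rw [hB]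
        have hAj : fieldnames.findIdx? (fun x => pvFb (pvNorm x)) = some j := by
          rw [← hj]
          apply findIdx?_congr_mem
          intro x hx
          rw [hrF x hx, hmF8]
          by_cases hfb : pvFb (pvNorm x) <;> simp [hfb]
        rw [hfall] at hAj
        obtain rfl : i = j := by injection hAj
        simp
      | none =>
        rw [List.findIdx?_eq_none_iff] at hfall
        have hmF10 : pvMinBy (fun s => pvRankF (pvNorm s)) 10 fieldnames = 10 := by
          rcases pvMinBy_attained (fun s => pvRankF (pvNorm s)) 10 fieldnames with h10 | ⟨w, hw, hv⟩
          · omega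
          · rw [hrF w hw, if_neg (by simp [hfall w hw])] at hv
            have hble4 : pvMinBy (fun s => pvRankF (pvNorm s)) 10 fieldnames ≤ pvRankF (pvNorm w) :=
              pvMinBy_le_of_mem hw
            rw [hrF w hw, if_neg (by simp [hfall w hw])] at hble4
            omega
        have hB := hfold.2 (by omega)
        rw [hB]
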